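-- pv_equiv track=rewrite | github.com/MartinMa28/Algorithms_review | hash/isomorphic_string.py | _iso_encoding
-- ===== SOURCE A (Python) =====
-- def _iso_encoding(s):
--     cache = {}
--     enc = []
--     for ch in s:
--         if ch not in cache:
--             cache[ch] = len(cache) + 1
--
--         enc.append(cache[ch])
--
--     return enc
-- ===== SOURCE B (Python) =====
-- def _iso_encoding(s):
--     # Phase 1: collect the distinct characters in first-seen order.
--     order = []
--     seen = set()
--     for ch in s:
--         if ch not in seen:
--             seen.add(ch)
--             order.append(ch)
--     # Phase 2: build the full encoding table, then map the string through it.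
--     table = {ch: i + 1 for i, ch in enumerate(order)}
--     return [table[ch] for ch in s]
-- ===== Notes on version B (the rewrite author's own statement) =====
-- stated objective: alternative
-- what changed: A fuses table construction and output in one pass over one dict; B first collects the distinct characters in first-seen order, then builds the complete encoding table, then maps the string through it in a separate pass.
import Mathlib
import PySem

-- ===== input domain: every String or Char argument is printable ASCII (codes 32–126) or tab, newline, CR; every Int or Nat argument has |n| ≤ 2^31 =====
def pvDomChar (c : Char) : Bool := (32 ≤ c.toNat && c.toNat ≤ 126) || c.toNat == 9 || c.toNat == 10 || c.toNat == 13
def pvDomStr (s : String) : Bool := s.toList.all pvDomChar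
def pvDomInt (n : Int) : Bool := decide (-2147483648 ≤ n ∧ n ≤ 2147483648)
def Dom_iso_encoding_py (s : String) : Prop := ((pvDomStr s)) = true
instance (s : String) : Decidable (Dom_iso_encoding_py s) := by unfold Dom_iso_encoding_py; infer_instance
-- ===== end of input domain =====

-- B replaces A's fused single-pass dict construction by two distinct phases (collect the
-- first-seen order and build the full table, then a separate mapping pass); same cost.

-- ===== PORT A =====
-- the for-loop of A: state (cache, enc), branches in A's order
def isoA_loop : List Char → PySem.Dict Char Int → List Int → List Int
  | [], _, enc => enc
  | ch :: rest, cache, enc =>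
    let cache := if cache.contains ch then cache else cache.insert ch (cache.size + 1)
    -- cache[ch]: ch is a key here (just inserted if missing), so the default is never used
    isoA_loop rest cache (enc ++ [cache.getD ch 0])

def iso_encoding_py (s : String) : List Int :=
  isoA_loop s.toList PySem.Dict.empty []

-- ===== PORT B =====
-- phase-1 loop of B: state (seen, order)
def isoB_loop : List Char → PySem.Set Char → List Char → PySem.Set Char × List Char
  | [], seen, order => (seen, order)
  | ch :: rest, seen, order =>
    if PySem.Set.contains seen ch then isoB_loop rest seen order
    else isoB_loop rest (PySem.Set.add seen ch) (order ++ [ch])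

-- {ch: i + 1 for i, ch in enumerate(order)}
def isoB_table (order : List Char) : PySem.Dict Char Int :=
  (PySem.List.enumerate order 0).foldl (fun d p => d.insert p.2 (p.1 + 1)) PySem.Dict.empty

def iso_encoding_py_alt (s : String) : List Int :=
  let st := isoB_loop s.toList PySem.Set.empty []
  let table := isoB_table st.2
  -- table[ch]: every character of s is a key of table, so the default is never used
  s.toList.map (fun ch => table.getD ch 0)

-- ===== PRECONDITION & SPEC =====
def Spec_iso_encoding_py (s : String) (out : List Int) : Prop := out = iso_encoding_py_alt s
instance (s : String) (out : List Int) : Decidable (Spec_iso_encoding_py s out) := by unfold Spec_iso_encoding_py; infer_instance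

-- ===== CLAIM (what is proved, stated in full; the proofs are below) =====
def Claim_equal_iso_encoding_py : Prop := ∀ (s : String), Dom_iso_encoding_py s → Spec_iso_encoding_py s (iso_encoding_py s)

-- ===== LEMMAS AND PROOFS =====

-- common reference computation: encode l, given the characters of d were already seen (in that order)
def encAux : List Char → List Char → List Int
  | [], _ => []
  | ch :: rest, d =>
    let d' := if ch ∈ d then d else d ++ [ch]
    ((d'.idxOf ch : Int) + 1) :: encAux rest d'

theorem add_eq_ite (d : List Char) (ch : Char) :
    PySem.Set.add d ch = if ch ∈ d then d else d ++ [ch] := by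
  by_cases h : ch ∈ d <;> simp [PySem.Set.add, PySem.Set.contains, h]

theorem idxOf_update (l : List Char) : ∀ (d : List Char) (ch : Char), ch ∈ d →
    (PySem.Set.update d l).idxOf ch = d.idxOf ch := by
  induction l with
  | nil => intro d ch _; rfl
  | cons x l ih =>
    intro d ch h
    have h1 : PySem.Set.update d (x :: l) = PySem.Set.update (PySem.Set.add d x) l := rfl
    rw [h1, ih _ ch (by rw [PySem.Set.mem_add]; exact Or.inl h), add_eq_ite]
    split
    · rfl
    · exact List.idxOf_append_of_mem h

theorem encAux_eq_map (l : List Char) : ∀ (d : List Char),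
    encAux l d = l.map (fun ch => (((PySem.Set.update d l).idxOf ch : Int) + 1)) := by
  induction l with
  | nil => intro d; rfl
  | cons ch rest ih =>
    intro d
    have hupd : PySem.Set.update d (ch :: rest)
        = PySem.Set.update (if ch ∈ d then d else d ++ [ch]) rest := by
      rw [← add_eq_ite]; rfl
    have hmem : ch ∈ (if ch ∈ d then d else d ++ [ch]) := by split <;> simp_all
    simp only [encAux, List.map_cons, hupd]
    rw [idxOf_update _ _ _ hmem, ih]

theorem isoB_loop_eq (l : List Char) : ∀ (d : List Char),
    isoB_loop l d d = (PySem.Set.update d l, PySem.Set.update d l) := by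
  induction l with
  | nil => intro d; rfl
  | cons ch rest ih =>
    intro d
    have h1 : PySem.Set.update d (ch :: rest) = PySem.Set.update (PySem.Set.add d ch) rest := rfl
    simp only [isoB_loop, h1]
    by_cases h : PySem.Set.contains d ch
    · have : PySem.Set.add d ch = d := by unfold PySem.Set.add; rw [if_pos h]
      rw [if_pos h, this, ih d]
    · have hadd : PySem.Set.add d ch = d ++ [ch] := by unfold PySem.Set.add; rw [if_neg h]
      rw [if_neg h, hadd, ih (d ++ [ch])]

theorem isoB_table_get? (xs : List Char) : ∀ (s : Int) (dd : PySem.Dict Char Int), xs.Nodup →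
    ∀ ch, ((PySem.List.enumerate xs s).foldl (fun d p => d.insert p.2 (p.1 + 1)) dd).get? ch
      = if ch ∈ xs then some (s + (xs.idxOf ch : Int) + 1) else dd.get? ch := by
  induction xs with
  | nil => intro s dd _ ch; simp [PySem.List.enumerate_nil]
  | cons x xs ih =>
    intro s dd hnd ch
    rw [PySem.List.enumerate_cons]
    simp only [List.foldl_cons]
    rw [ih (s + 1) (dd.insert x (s + 1)) hnd.of_cons ch]
    by_cases hx : ch = x
    · subst hx
      have hnx : ch ∉ xs := (List.nodup_cons.mp hnd).1
      rw [if_neg hnx, if_pos (List.mem_cons_self), PySem.Dict.get?_insert_self,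
        List.idxOf_cons_self]
      simp
    · by_cases hm : ch ∈ xs
      · rw [if_pos hm, if_pos (List.mem_cons_of_mem _ hm),
          List.idxOf_cons_ne _ (fun he => hx he.symm)]
        congr 1
        push_cast
        ring
      · rw [if_neg hm, if_neg (by simp [hx, hm]), PySem.Dict.get?_insert_of_ne _ _ hx]

theorem isoA_loop_eq (l : List Char) : ∀ (d : List Char) (cache : PySem.Dict Char Int) (acc : List Int),
    d.Nodup →
    (∀ ch, cache.get? ch = if ch ∈ d then some ((d.idxOf ch : Int) + 1) else none) →
    cache.size = d.length →
    isoA_loop l cache acc = acc ++ encAux l d := by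
  induction l with
  | nil => intro d cache acc _ _ _; simp [isoA_loop, encAux]
  | cons ch rest ih =>
    intro d cache acc hnd hget hsize
    have hc : cache.contains ch = true ↔ ch ∈ d := by
      rw [PySem.Dict.contains_eq_isSome_get?, hget]
      by_cases h : ch ∈ d <;> simp [h]
    by_cases h : ch ∈ d
    · simp only [isoA_loop]
      rw [if_pos (hc.mpr h)]
      rw [ih d cache _ hnd hget hsize]
      have hv : cache.getD ch 0 = (d.idxOf ch : Int) + 1 := by
        rw [PySem.Dict.getD_eq_get?_getD, hget, if_pos h]; rfl
      simp only [encAux, if_pos h, hv, List.append_assoc, List.singleton_append]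
    · have hnd' : (d ++ [ch]).Nodup := by
        rw [List.nodup_append]
        exact ⟨hnd, List.nodup_singleton ch, fun a ha => by simp; rintro rfl; exact h ha⟩
      have hget' : ∀ x, (cache.insert ch (cache.size + 1)).get? x
          = if x ∈ d ++ [ch] then some (((d ++ [ch]).idxOf x : Int) + 1) else none := by
        intro x
        rw [PySem.Dict.get?_insert]
        by_cases hx : x = ch
        · subst hx
          rw [if_pos rfl, if_pos (by simp), List.idxOf_append_of_notMem h,
            List.idxOf_cons_self, hsize]
          simp
        · rw [if_neg hx, hget]
          by_cases hxd : x ∈ d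
          · rw [if_pos hxd, if_pos (List.mem_append_left _ hxd), List.idxOf_append_of_mem hxd]
          · rw [if_neg hxd, if_neg (by simp [hx, hxd])]
      have hsize' : (cache.insert ch (cache.size + 1)).size = (d ++ [ch]).length := by
        rw [PySem.Dict.size_insert, if_neg (fun hh => h (hc.mp hh)), hsize]
        simp
      simp only [isoA_loop]
      rw [if_neg (fun hh => h (hc.mp hh))]
      rw [ih (d ++ [ch]) _ _ hnd' hget' hsize']
      have hv : (cache.insert ch (cache.size + 1)).getD ch 0 = ((d ++ [ch]).idxOf ch : Int) + 1 := by
        rw [PySem.Dict.getD_insert_self, hsize, List.idxOf_append_of_notMem h, List.idxOf_cons_self]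
        simp
      simp only [encAux, if_neg h, hv, List.append_assoc, List.singleton_append]

-- ===== VERDICT (by name: the statement is the Claim_ definition above) =====
theorem iso_encoding_py_spec : Claim_equal_iso_encoding_py := by
  intro s _
  show iso_encoding_py s = iso_encoding_py_alt s
  unfold iso_encoding_py iso_encoding_py_alt
  have hset : (PySem.Set.empty : PySem.Set Char) = ([] : List Char) := rfl
  rw [hset, isoA_loop_eq s.toList [] PySem.Dict.empty []
    List.nodup_nil (fun ch => by simp [PySem.Dict.get?_empty]) (by simp [PySem.Dict.size_empty]),
    isoB_loop_eq]
  simp only [List.nil_append]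
  have hO : PySem.Set.update ([] : List Char) s.toList = PySem.Set.ofList s.toList := by
    rw [PySem.Set.ofList_eq_foldl]; rfl
  have hmap : s.toList.map (fun ch => (isoB_table (PySem.Set.update ([] : List Char) s.toList)).getD ch 0)
      = s.toList.map (fun ch => (((PySem.Set.update ([] : List Char) s.toList).idxOf ch : Int) + 1)) := by
    apply List.map_congr_left
    intro ch hch
    rw [PySem.Dict.getD_eq_get?_getD]
    unfold isoB_table
    rw [isoB_table_get? _ 0 PySem.Dict.empty (hO ▸ PySem.Set.nodup_ofList s.toList) ch,
      if_pos (by rw [hO, PySem.Set.mem_ofList]; exact hch)]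
    simp
  rw [hmap, encAux_eq_map]
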